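-- pv_equiv track=rewrite | github.com/isabellakqq/Alogorithm | slidingWindow/1838FrequencyoftheMostFrequentElement.py | get_max_freq
-- ===== SOURCE A (Python) =====
-- def get_max_freq(nums, k):
--     if not nums:
--         return 0
--     nums.sort()
--     res = 0
--     start, end = 0, 0
--     cur_sum = 0
--     while end < len(nums):
--         cur_sum += nums[end]
--         while nums[end] * (end - start + 1) - cur_sum > k:
--             cur_sum -= nums[start]
--             start += 1
--         res = max(res, end - start + 1)
--         end += 1
--     return res
-- ===== SOURCE B (Python) =====
-- def get_max_freq(nums, k):
--     # sorts nums in place, like the original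
--     nums.sort()
--     n = len(nums)
--     run = 0
--     prefix = [0]
--     for x in nums:
--         run += x
--         prefix.append(run)
--     res = 0
--     for i in range(n):
--         # binary search the smallest j in [0, i] with
--         # nums[i]*(i-j+1) - (prefix[i+1]-prefix[j]) <= k
--         lo, hi = 0, i
--         while lo < hi:
--             mid = (lo + hi) // 2
--             if nums[i] * (i - mid + 1) - (prefix[i + 1] - prefix[mid]) <= k:
--                 hi = mid
--             else:
--                 lo = mid + 1
--         if nums[i] * (i - lo + 1) - (prefix[i + 1] - prefix[lo]) <= k:
--             res = max(res, i - lo + 1)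
--     return res
-- ===== Notes on version B (the rewrite author's own statement) =====
-- stated objective: alternative
-- what changed: Replaces A's amortized two-pointer sliding window (carried start/cur_sum state) by a per-index binary search over a precomputed prefix-sum array for the smallest affordable left boundary.
import Mathlib
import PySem

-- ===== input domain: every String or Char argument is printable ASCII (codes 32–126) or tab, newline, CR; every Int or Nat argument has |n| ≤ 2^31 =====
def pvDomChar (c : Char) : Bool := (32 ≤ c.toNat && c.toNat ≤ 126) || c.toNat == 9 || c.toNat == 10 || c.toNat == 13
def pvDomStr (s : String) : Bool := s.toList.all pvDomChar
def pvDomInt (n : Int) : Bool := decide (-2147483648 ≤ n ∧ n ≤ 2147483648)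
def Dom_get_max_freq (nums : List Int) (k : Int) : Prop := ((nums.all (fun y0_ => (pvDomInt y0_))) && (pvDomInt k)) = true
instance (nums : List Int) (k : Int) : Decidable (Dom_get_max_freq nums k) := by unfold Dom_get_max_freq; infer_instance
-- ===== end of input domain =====

-- B replaces A's amortized sliding window by a per-index binary search over a prefix-sum
-- array (objective: alternative decomposition, same answer). Both A and B sort `nums` in
-- place in Python; the equivalence proved here is about the return value.

-- ===== PORT A =====
-- inner `while` of A; fuel-bounded, `none` exactly where Python raises IndexError (or fuel runs out,
-- which under Pre_ never happens before the IndexError case is reached)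
def innerA (s : List Int) (k nd : Int) (e : Nat) : Nat → Nat → Int → Option (Nat × Int)
  | 0, _, _ => none
  | fuel+1, start, curSum =>
    if nd * ((e : Int) - (start : Int) + 1) - curSum > k then
      match s[start]? with
      | none => none           -- IndexError: nums[start] out of range
      | some v => innerA s k nd e fuel (start+1) (curSum - v)
    else some (start, curSum)

-- outer `while end < len(nums)` of A, state (end, start, cur_sum, res)
def outerA (s : List Int) (k : Int) : Nat → Nat → Nat → Int → Int → Option Int
  | 0, _, _, _, res => some res
  | rem+1, e, start, curSum, res =>
    match s[e]? with
    | none => none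
    | some nd =>
      match innerA s k nd e (s.length + 1) start (curSum + nd) with
      | none => none
      | some (start', curSum') =>
        outerA s k rem (e+1) start' curSum' (max res ((e : Int) - (start' : Int) + 1))

def get_max_freq (nums : List Int) (k : Int) : Int :=
  if nums = [] then 0
  else
    let s := PySem.List.sorted nums (fun x => x) false
    match outerA s k s.length 0 0 0 0 with
    | some r => r
    | none => 0                -- only where Python raises; excluded by Pre_

-- ===== PORT B =====
-- prefix-sum list: run = 0; prefix = [0]; for x in nums: run += x; prefix.append(run)
def buildPrefix (s : List Int) : List Int × Int :=
  s.foldl (fun (pr : List Int × Int) x => (pr.1 ++ [pr.2 + x], pr.2 + x)) ([0], 0)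

-- `while lo < hi` binary search; fuel-bounded (fuel ≥ hi - lo suffices)
def bsearchB (nd pI1 : Int) (pfx : List Int) (k : Int) (i : Nat) : Nat → Nat → Nat → Nat
  | 0, lo, _ => lo
  | fuel+1, lo, hi =>
    if lo < hi then
      let mid := (lo + hi) / 2
      if nd * ((i : Int) - (mid : Int) + 1) - (pI1 - pfx.getD mid 0) ≤ k then
        bsearchB nd pI1 pfx k i fuel lo mid
      else
        bsearchB nd pI1 pfx k i fuel (mid+1) hi
    else lo

def get_max_freq_alt (nums : List Int) (k : Int) : Int :=
  let s := PySem.List.sorted nums (fun x => x) false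
  let n := s.length
  let pfx := (buildPrefix s).1
  (List.range n).foldl (fun res i =>
    let lo := bsearchB (s.getD i 0) (pfx.getD (i+1) 0) pfx k i (i+1) 0 i
    if s.getD i 0 * ((i : Int) - (lo : Int) + 1) - (pfx.getD (i+1) 0 - pfx.getD lo 0) ≤ k then
      max res ((i : Int) - (lo : Int) + 1)
    else res) 0

-- ===== PRECONDITION & SPEC =====
-- Pre_ excludes exactly the inputs where A raises IndexError: a nonempty list with k < 0
-- (the inner while then never stops and runs past the left end of the list).
def Pre_get_max_freq (nums : List Int) (k : Int) : Prop := nums = [] ∨ 0 ≤ k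
instance (nums : List Int) (k : Int) : Decidable (Pre_get_max_freq nums k) := by
  unfold Pre_get_max_freq; infer_instance

def pvWitness_get_max_freq : List Int × Int := ([1, 4, 2, 2], 5)

def Spec_get_max_freq (nums : List Int) (k : Int) (out : Int) : Prop := out = get_max_freq_alt nums k
instance (nums : List Int) (k : Int) (out : Int) : Decidable (Spec_get_max_freq nums k out) := by
  unfold Spec_get_max_freq; infer_instance

-- ===== CLAIM (what is proved, stated in full; the proofs are below) =====
def Claim_equal_get_max_freq : Prop := ∀ (nums : List Int) (k : Int), Dom_get_max_freq nums k → Pre_get_max_freq nums k → Spec_get_max_freq nums k (get_max_freq nums k)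

-- ===== LEMMAS AND PROOFS =====

-- sum of the first m elements of s (the value Python's prefix[m] holds)
def preS (s : List Int) (m : Nat) : Int := ((s.take m).sum)

-- cost of raising s[j..i] to s[i]
def costS (s : List Int) (i j : Nat) : Int :=
  s.getD i 0 * ((i : Int) - (j : Int) + 1) - (preS s (i+1) - preS s j)

-- least j with costS s i j ≤ k (or i+1 if none up to i)
def jmS (s : List Int) (k : Int) (i : Nat) : Nat :=
  Nat.find (p := fun j => costS s i j ≤ k ∨ i < j) ⟨i+1, Or.inr (Nat.lt_succ_self i)⟩

-- common value of both programs
def resS (s : List Int) (k : Int) (m : Nat) : Int :=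
  (List.range m).foldl (fun (r : Int) (i : Nat) => max r ((i : Int) - (jmS s k i : Int) + 1)) 0

theorem preS_succ (s : List Int) (m : Nat) (h : m < s.length) :
    preS s (m+1) = preS s m + s.getD m 0 := by
  simp only [preS, List.sum_take_succ s m h, List.getD_eq_getElem s 0 h]

theorem costS_self (s : List Int) (i : Nat) (h : i < s.length) : costS s i i = 0 := by
  have h1 := preS_succ s i h
  simp only [costS, List.getD_eq_getElem s 0 h] at *
  have h2 : ((i : Int) - (i : Int) + 1) = 1 := by ring
  rw [h2, mul_one]; omega

theorem costS_step (s : List Int) (i j : Nat) (h : j < s.length) :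
    costS s i j = costS s i (j+1) + (s.getD i 0 - s.getD j 0) := by
  simp only [costS]
  rw [preS_succ s j h]
  push_cast
  ring

-- s is sorted (as used below)
def SortedS (s : List Int) : Prop :=
  ∀ p q : Nat, p ≤ q → q < s.length → s.getD p 0 ≤ s.getD q 0

theorem costS_mono_j (s : List Int) (hs : SortedS s) (i j j' : Nat)
    (h1 : j ≤ j') (h2 : j' ≤ i) (h3 : i < s.length) : costS s i j' ≤ costS s i j := by
  obtain ⟨d, rfl⟩ : ∃ d, j' = j + d := ⟨j' - j, by omega⟩
  clear h1
  induction d with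
  | zero => simp
  | succ d ih =>
    have h4 : j + d < s.length := by omega
    have hstep := costS_step s i (j + d) h4
    have hle := hs (j + d) i (by omega) h3
    have hih := ih (by omega)
    have hsucc : j + (d + 1) = (j + d) + 1 := by omega
    rw [hsucc]
    linarith

theorem costS_mono_i (s : List Int) (hs : SortedS s) (i j : Nat)
    (h1 : j ≤ i + 1) (h2 : i + 1 < s.length) : costS s i j ≤ costS s (i+1) j := by
  have p1 := preS_succ s (i+1) h2
  have hle := hs i (i+1) (by omega) h2
  have key : costS s (i+1) j - costS s i j
      = (s.getD (i+1) 0 - s.getD i 0) * ((i : Int) - (j : Int) + 1) := by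
    simp only [costS]
    rw [p1]
    push_cast
    ring
  have hj : (j : Int) ≤ (i : Int) + 1 := by exact_mod_cast h1
  have hnn : 0 ≤ (s.getD (i+1) 0 - s.getD i 0) * ((i : Int) - (j : Int) + 1) :=
    mul_nonneg (by omega) (by linarith)
  linarith

theorem jmS_le (s : List Int) (k : Int) (hk : 0 ≤ k) (i : Nat) (h : i < s.length) :
    jmS s k i ≤ i := by
  unfold jmS
  exact Nat.find_le (Or.inl (by rw [costS_self s i h]; exact hk))

theorem jmS_cost (s : List Int) (k : Int) (hk : 0 ≤ k) (i : Nat) (h : i < s.length) :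
    costS s i (jmS s k i) ≤ k := by
  have hle := jmS_le s k hk i h
  have hspec := Nat.find_spec (p := fun j => costS s i j ≤ k ∨ i < j)
    ⟨i+1, Or.inr (Nat.lt_succ_self i)⟩
  rcases hspec with hc | hlt
  · exact hc
  · exact absurd hlt (by unfold jmS at hle; omega)

theorem jmS_min (s : List Int) (k : Int) (i j : Nat) (hj : j < jmS s k i) :
    ¬ costS s i j ≤ k := by
  unfold jmS at hj
  have h2 := Nat.find_min (p := fun j => costS s i j ≤ k ∨ i < j)
    ⟨i+1, Or.inr (Nat.lt_succ_self i)⟩ hj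
  intro hc
  exact h2 (Or.inl hc)

theorem jmS_mono (s : List Int) (k : Int) (hs : SortedS s) (hk : 0 ≤ k) (i : Nat)
    (h : i + 1 < s.length) : jmS s k i ≤ jmS s k (i+1) := by
  have hc := jmS_cost s k hk (i+1) h
  have hle := jmS_le s k hk (i+1) h
  by_cases hlt : i < jmS s k (i+1)
  · unfold jmS
    exact Nat.find_le (Or.inr hlt)
  · unfold jmS
    refine Nat.find_le (Or.inl ?_)
    exact le_trans (costS_mono_i s hs i (jmS s k (i+1)) (by omega) h) hc

theorem innerA_spec (s : List Int) (k : Int) (hk : 0 ≤ k) (e : Nat) (he : e < s.length)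
    (fuel start : Nat) (curSum : Int)
    (hstart : start ≤ jmS s k e) (hfuel : jmS s k e < start + fuel)
    (hsum : curSum = preS s (e+1) - preS s start) :
    innerA s k (s.getD e 0) e fuel start curSum
      = some (jmS s k e, preS s (e+1) - preS s (jmS s k e)) := by
  induction fuel generalizing start curSum with
  | zero => omega
  | succ fuel ih =>
    have hcond : s.getD e 0 * ((e : Int) - (start : Int) + 1) - curSum = costS s e start := by
      rw [hsum]; simp [costS]
    by_cases hb : start = jmS s k e
    · subst hb
      have hcle := jmS_cost s k hk e he
      simp only [innerA]
      rw [if_neg (by omega)]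
      rw [hsum]
    · have hlt : start < jmS s k e := by omega
      have hgt : ¬ costS s e start ≤ k := jmS_min s k e start hlt
      have hjm := jmS_le s k hk e he
      have hsl : start < s.length := by omega
      simp only [innerA]
      rw [if_pos (by omega), List.getElem?_eq_getElem hsl]
      exact ih (start+1) (curSum - s[start]) (by omega) (by omega)
        (by rw [hsum, preS_succ s start hsl, List.getD_eq_getElem s 0 hsl]; ring)

theorem outerA_spec (s : List Int) (k : Int) (hs : SortedS s) (hk : 0 ≤ k) :
    ∀ (rem e start : Nat) (curSum res : Int), e + rem = s.length →
      (e < s.length → start ≤ jmS s k e) →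
      curSum = preS s e - preS s start → res = resS s k e →
      outerA s k rem e start curSum res = some (resS s k (s.length)) := by
  intro rem
  induction rem with
  | zero =>
    intro e start curSum res hlen _ _ hres
    have he : e = s.length := by omega
    subst he
    simp only [outerA]
    rw [hres]
  | succ rem ih =>
    intro e start curSum res hlen hstart hsum hres
    have he : e < s.length := by omega
    have hst := hstart he
    have hjm := jmS_le s k hk e he
    simp only [outerA]
    rw [List.getElem?_eq_getElem he]
    have hinner := innerA_spec s k hk e he (s.length + 1) start (curSum + s[e])
      hst (by omega)
      (by rw [hsum, preS_succ s e he, List.getD_eq_getElem s 0 he]; ring)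
    rw [List.getD_eq_getElem s 0 he] at hinner
    simp only [hinner]
    refine ih (e+1) (jmS s k e) _ _ (by omega) ?_ rfl ?_
    · intro he1
      exact jmS_mono s k hs hk e he1
    · rw [hres]
      simp only [resS, List.range_succ, List.foldl_append, List.foldl_cons, List.foldl_nil]

theorem preS_zero (s : List Int) : preS s 0 = 0 := rfl

theorem preS_cons (x : Int) (t : List Int) (m : Nat) : preS (x :: t) (m+1) = x + preS t m := by
  simp [preS, List.take_succ_cons]

theorem buildPrefix_aux (s : List Int) : ∀ (p : List Int) (r : Int),
    s.foldl (fun (pr : List Int × Int) x => (pr.1 ++ [pr.2 + x], pr.2 + x)) (p, r)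
      = (p ++ (List.range s.length).map (fun m => r + preS s (m+1)), r + preS s s.length) := by
  induction s with
  | nil => intro p r; simp [preS]
  | cons x t ih =>
    intro p r
    rw [List.foldl_cons, ih (p ++ [r + x]) (r + x)]
    refine Prod.ext ?_ ?_
    · simp only [List.length_cons, List.range_succ_eq_map, List.map_cons, List.map_map]
      simp [Function.comp, preS_cons, preS_zero, List.append_assoc, add_assoc]
    · simp [preS_cons, add_assoc]

theorem buildPrefix_eq (s : List Int) :
    (buildPrefix s).1 = (List.range (s.length + 1)).map (preS s) := by
  unfold buildPrefix
  rw [buildPrefix_aux s [0] 0]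
  simp only [List.range_succ_eq_map, List.map_cons, List.map_map]
  simp [Function.comp, preS_zero]

theorem prefix_getD (s : List Int) (m : Nat) (hm : m ≤ s.length) :
    ((buildPrefix s).1).getD m 0 = preS s m := by
  rw [buildPrefix_eq]
  exact PySem.List.getD_map_range (preS s) (s.length + 1) m 0 (by omega)

theorem bsearchB_spec (s : List Int) (k : Int) (hs : SortedS s) (hk : 0 ≤ k)
    (i : Nat) (hi : i < s.length) :
    ∀ (fuel lo hb : Nat), lo ≤ jmS s k i → jmS s k i ≤ hb → hb ≤ i → hb - lo ≤ fuel →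
      bsearchB (s.getD i 0) (preS s (i+1)) ((buildPrefix s).1) k i fuel lo hb = jmS s k i := by
  intro fuel
  induction fuel with
  | zero =>
    intro lo hb h1 h2 h3 h4
    simp only [bsearchB]
    omega
  | succ fuel ih =>
    intro lo hb h1 h2 h3 h4
    by_cases hlh : lo < hb
    · have hmidlt : (lo + hb) / 2 < hb := by omega
      have hmidge : lo ≤ (lo + hb) / 2 := by omega
      have hpm : ((buildPrefix s).1).getD ((lo + hb) / 2) 0 = preS s ((lo + hb) / 2) :=
        prefix_getD s _ (by omega)
      have hcond : s.getD i 0 * ((i : Int) - ((lo + hb) / 2 : Nat) + 1)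
          - (preS s (i+1) - ((buildPrefix s).1).getD ((lo + hb) / 2) 0)
          = costS s i ((lo + hb) / 2) := by
        rw [hpm]; simp [costS]
      simp only [bsearchB]
      rw [if_pos hlh]
      by_cases hc : costS s i ((lo + hb) / 2) ≤ k
      · rw [if_pos (hcond ▸ hc)]
        have hle : jmS s k i ≤ (lo + hb) / 2 := by
          unfold jmS; exact Nat.find_le (Or.inl hc)
        exact ih lo _ h1 hle (by omega) (by omega)
      · rw [if_neg (hcond ▸ hc)]
        have hgt : (lo + hb) / 2 < jmS s k i := by
          by_contra hcon
          exact hc (le_trans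
            (costS_mono_j s hs i (jmS s k i) ((lo + hb) / 2) (by omega) (by omega) hi)
            (jmS_cost s k hk i hi))
        exact ih _ hb (by omega) h2 h3 (by omega)
    · simp only [bsearchB]
      rw [if_neg hlh]
      omega

theorem alt_eq_resS (s : List Int) (k : Int) (hs : SortedS s) (hk : 0 ≤ k) :
    (List.range s.length).foldl (fun res i =>
      let lo := bsearchB (s.getD i 0) (((buildPrefix s).1).getD (i+1) 0) ((buildPrefix s).1) k i (i+1) 0 i
      if s.getD i 0 * ((i : Int) - (lo : Int) + 1) - (((buildPrefix s).1).getD (i+1) 0 - ((buildPrefix s).1).getD lo 0) ≤ k then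
        max res ((i : Int) - (lo : Int) + 1)
      else res) 0 = resS s k (s.length) := by
  unfold resS
  refine PySem.List.foldl_congr_mem _ _ _ _ ?_
  intro acc i hmem
  rw [List.mem_range] at hmem
  have hp1 : ((buildPrefix s).1).getD (i+1) 0 = preS s (i+1) := prefix_getD s (i+1) (by omega)
  have hjle := jmS_le s k hk i hmem
  have hbs := bsearchB_spec s k hs hk i hmem (i+1) 0 i (Nat.zero_le _) hjle le_rfl (by omega)
  have hpl : ((buildPrefix s).1).getD (jmS s k i) 0 = preS s (jmS s k i) :=
    prefix_getD s _ (by omega)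
  have hcle := jmS_cost s k hk i hmem
  simp only [hp1]
  rw [hbs, hpl]
  simp only [costS] at hcle
  rw [if_pos hcle]

theorem sortedS_sorted (nums : List Int) : SortedS (PySem.List.sorted nums (fun x => x) false) := by
  intro p q hpq hq
  rw [List.getD_eq_getElem _ 0 hq, List.getD_eq_getElem _ 0 (lt_of_le_of_lt hpq hq)]
  exact PySem.List.sorted_id_getElem_mono nums hpq hq

-- ===== VERDICT (by name: the statement is the Claim_ definition above) =====
theorem get_max_freq_spec : Claim_equal_get_max_freq := by
  intro nums k _ hpre
  unfold Spec_get_max_freq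
  by_cases hnil : nums = []
  · subst hnil; rfl
  · have hk : 0 ≤ k := hpre.resolve_left hnil
    have hs : SortedS (PySem.List.sorted nums (fun x => x) false) := sortedS_sorted nums
    have houter := outerA_spec (PySem.List.sorted nums (fun x => x) false) k hs hk
      (PySem.List.sorted nums (fun x => x) false).length 0 0 0 0 (by omega)
      (fun _ => Nat.zero_le _) (by simp [preS]) rfl
    have halt := alt_eq_resS (PySem.List.sorted nums (fun x => x) false) k hs hk
    simp only [get_max_freq, get_max_freq_alt, if_neg hnil]
    rw [houter]
    exact halt.symm
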